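-- pv_equiv track=rewrite | github.com/RoAnWo/CityDraftPrjct | Plot_Machine _debugged.py | find_overlapping_plots
-- ===== SOURCE A (Python) =====
-- def find_overlapping_plots(plots):
--     # Create a dictionary to store the mapping from plot number to overlapping plots
--     plot_overlaps = {}
--     # Iterate over each plot
--     for i, plot in enumerate(plots):
--         # Initialize an empty list to store the overlapping plots for this plot
--         overlaps = []
--         # Iterate over the other plots
--         for j, other_plot in enumerate(plots):
--             # Skip the current plot
--             if i == j:
--                 continue
--             # Check if the current plot has 2 or more coordinates in common with the other plot
--             common_coords = set(plot).intersection(set(other_plot))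
--             if len(common_coords) >= 2:
--                 overlaps.append(j)
--         # Add the mapping from plot number to overlapping plots to the dictionary
--         plot_overlaps[i] = overlaps
--     # Create a list of tuples (plot number, overlapping plots) from the dictionary
--     result = [(plot, overlaps) for plot, overlaps in plot_overlaps.items()]
--     return result
-- ===== SOURCE B (Python) =====
-- def find_overlapping_plots(plots):
--     # Inverted index: coordinate -> plots containing it; then per-plot shared-coordinate
--     # counting, instead of A's pairwise set intersections (O(n^2 * k)).
--     index = {}
--     for i, plot in enumerate(plots):
--         for c in set(plot):
--             index.setdefault(c, []).append(i)
--     result = []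
--     for i, plot in enumerate(plots):
--         counts = {}
--         for c in set(plot):
--             for j in index[c]:
--                 counts[j] = counts.get(j, 0) + 1
--         result.append((i, sorted(j for j in counts if counts[j] >= 2 and j != i)))
--     return result
-- ===== Notes on version B (the rewrite author's own statement) =====
-- stated objective: faster
-- what changed: Replaces A's all-pairs set intersections with an inverted index from coordinate to the plots containing it, then counts shared distinct coordinates per plot via that index and sorts the qualifying partners.
import Mathlib
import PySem

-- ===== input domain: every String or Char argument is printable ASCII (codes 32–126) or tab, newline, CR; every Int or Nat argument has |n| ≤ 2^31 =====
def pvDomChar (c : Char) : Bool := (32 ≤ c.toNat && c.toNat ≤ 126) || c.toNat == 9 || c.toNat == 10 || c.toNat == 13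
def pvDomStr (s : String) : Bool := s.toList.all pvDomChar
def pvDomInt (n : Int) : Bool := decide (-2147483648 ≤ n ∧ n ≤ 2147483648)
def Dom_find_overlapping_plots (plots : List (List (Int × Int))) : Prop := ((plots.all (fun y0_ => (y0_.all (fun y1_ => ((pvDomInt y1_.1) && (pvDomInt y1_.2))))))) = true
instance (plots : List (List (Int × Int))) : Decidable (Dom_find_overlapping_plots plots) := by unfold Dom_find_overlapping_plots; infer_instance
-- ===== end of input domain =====

-- B replaces A's O(n^2*k) pairwise set intersections by an inverted coordinate->plots index
-- with per-plot shared-coordinate counting (measured faster); same return value, proved below.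

-- ===== PORT A =====
def find_overlapping_plots (plots : List (List (Int × Int))) : List (Int × List Int) :=
  let plot_overlaps : PySem.Dict Int (List Int) :=
    (PySem.List.enumerate plots).foldl (fun d ip =>
      let overlaps : List Int :=
        (PySem.List.enumerate plots).foldl (fun acc jp =>
          if ip.1 = jp.1 then acc
          else
            let common := PySem.Set.inter (PySem.Set.ofList ip.2) (PySem.Set.ofList jp.2)
            if 2 ≤ PySem.Set.len common then acc ++ [jp.1] else acc) []
      d.insert ip.1 overlaps) PySem.Dict.empty
  plot_overlaps.items.map (fun po => (po.1, po.2))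

-- ===== PORT B =====
-- set(plot) is iterated only to build / feed order-independent structures (dict values and a
-- key-sorted output), so PySem.Set.ofList's first-occurrence order is exact here.
-- index[c] / counts[j]: the key is always present at that point, so getD is exact.
def find_overlapping_plots_alt (plots : List (List (Int × Int))) : List (Int × List Int) :=
  let index : PySem.Dict (Int × Int) (List Int) :=
    (PySem.List.enumerate plots).foldl (fun d ip =>
      (PySem.Set.ofList ip.2).foldl (fun d c => d.modify c [] (fun l => l ++ [ip.1])) d)
      PySem.Dict.empty
  (PySem.List.enumerate plots).foldl (fun res ip =>
    let counts : PySem.Dict Int Int :=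
      (PySem.Set.ofList ip.2).foldl (fun cd c =>
        (index.getD c []).foldl (fun cd j => cd.modify j 0 (fun x => x + 1)) cd)
        PySem.Dict.empty
    res ++ [(ip.1, PySem.List.sorted
      (counts.keys.filter (fun j => decide (2 ≤ counts.getD j 0) && decide (¬ j = ip.1)))
      (fun j => j))]) []

-- ===== PRECONDITION & SPEC =====
def Spec_find_overlapping_plots (plots : List (List (Int × Int))) (out : List (Int × List Int)) : Prop := out = find_overlapping_plots_alt plots
instance (plots : List (List (Int × Int))) (out : List (Int × List Int)) : Decidable (Spec_find_overlapping_plots plots out) := by unfold Spec_find_overlapping_plots; infer_instance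

-- ===== CLAIM (what is proved, stated in full; the proofs are below) =====
def Claim_equal_find_overlapping_plots : Prop := ∀ (plots : List (List (Int × Int))), Dom_find_overlapping_plots plots → Spec_find_overlapping_plots plots (find_overlapping_plots plots)

-- ===== LEMMAS AND PROOFS =====

-- number of distinct coordinates plot p shares with plot q
def pvCnt (p q : List (Int × Int)) : Nat :=
  (PySem.Set.ofList p).countP (fun c => decide (c ∈ PySem.Set.ofList q))

-- the row A computes for plot (i, p)
def pvRow (plots : List (List (Int × Int))) (i : Int) (p : List (Int × Int)) : List Int :=
  ((PySem.List.enumerate plots).filter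
    (fun jp => decide (¬ i = jp.1) && decide (2 ≤ pvCnt p jp.2))).map (fun jp => jp.1)


-- A-side: the port equals the canonical map of rows
theorem pvA_eq (plots : List (List (Int × Int))) :
    find_overlapping_plots plots
      = (PySem.List.enumerate plots).map (fun ip => (ip.1, pvRow plots ip.1 ip.2)) := by
  unfold find_overlapping_plots
  have hrow : ∀ ip : Int × List (Int × Int),
      (PySem.List.enumerate plots).foldl (fun acc jp =>
          if ip.1 = jp.1 then acc
          else
            if 2 ≤ PySem.Set.len (PySem.Set.inter (PySem.Set.ofList ip.2) (PySem.Set.ofList jp.2))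
            then acc ++ [jp.1] else acc) []
        = pvRow plots ip.1 ip.2 := by
    intro ip
    rw [PySem.List.foldl_congr_mem _ _
      (fun acc jp => if (decide (¬ ip.1 = jp.1) && decide (2 ≤ pvCnt ip.2 jp.2)) then acc ++ [jp.1] else acc) _ ?_]
    · rw [PySem.List.foldl_append_if]
      simp [pvRow]
    · intro acc jp _
      have hlen : PySem.Set.len (PySem.Set.inter (PySem.Set.ofList ip.2) (PySem.Set.ofList jp.2))
          = (pvCnt ip.2 jp.2 : Int) := by
        simp [PySem.Set.len, PySem.Set.inter, PySem.Set.contains, pvCnt,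
          List.countP_eq_length_filter]
      have h2' : (2 ≤ (pvCnt ip.2 jp.2 : Int)) ↔ (2 ≤ pvCnt ip.2 jp.2) := by
        exact_mod_cast Iff.rfl
      rw [hlen]
      by_cases h1 : ip.1 = jp.1 <;> by_cases h2 : (2:Nat) ≤ pvCnt ip.2 jp.2 <;>
        simp [h1, h2, h2']
  have hfresh := PySem.Dict.items_foldl_insert_fresh (ν := List Int)
      (PySem.List.enumerate plots) (fun ip => ip.1) (fun ip => pvRow plots ip.1 ip.2)
      PySem.Dict.empty (by intro a _; exact PySem.Dict.contains_empty _) ?_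
  · simp only [hrow] at hfresh ⊢
    rw [hfresh]
    simp [PySem.Dict.empty]
  · rw [PySem.List.map_fst_enumerate]
    have := PySem.List.pairwise_lt_enumerate plots 0
    rw [← PySem.List.map_fst_enumerate]
    exact List.Pairwise.imp (fun h => ne_of_lt h) ((List.pairwise_map).mpr this)

-- effect of the inner set-fold of the index construction on one bucket
theorem pvIndexStep (i : Int) (S : List (Int × Int)) (hS : S.Nodup)
    (d : PySem.Dict (Int × Int) (List Int)) (c : Int × Int) :
    ((S.foldl (fun d c' => d.modify c' [] (fun l => l ++ [i])) d).getD c [])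
      = d.getD c [] ++ (if c ∈ S then [i] else []) := by
  induction S generalizing d with
  | nil => simp
  | cons a S ih =>
    simp only [List.foldl_cons]
    rw [ih (List.Nodup.of_cons hS)]
    rw [PySem.Dict.getD_modify]
    by_cases hca : c = a
    · subst hca
      have hna : c ∉ S := (List.nodup_cons.mp hS).1
      simp [hna]
    · simp [hca, List.mem_cons]

-- the bucket of coordinate c in the finished index
theorem pvIndexChar (plots : List (List (Int × Int))) (s : Int)
    (d : PySem.Dict (Int × Int) (List Int)) (c : Int × Int) :
    (((PySem.List.enumerate plots s).foldl (fun d ip =>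
        (PySem.Set.ofList ip.2).foldl (fun d c' => d.modify c' [] (fun l => l ++ [ip.1])) d) d).getD c [])
      = d.getD c []
        ++ ((PySem.List.enumerate plots s).filter
              (fun ip => decide (c ∈ PySem.Set.ofList ip.2))).map (fun ip => ip.1) := by
  induction plots generalizing s d with
  | nil => simp [PySem.List.enumerate_nil]
  | cons p rest ih =>
    rw [PySem.List.enumerate_cons]
    simp only [List.foldl_cons, List.filter_cons]
    rw [ih, pvIndexStep s (PySem.Set.ofList p) (PySem.Set.nodup_ofList p) d c]
    by_cases hc : c ∈ PySem.Set.ofList p <;> simp [hc]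

-- a nested fold is a fold over the flattened list
theorem pvFoldlFlat {α β γ : Type} (l : List α) (g : α → List β) (f : γ → β → γ) (init : γ) :
    l.foldl (fun acc c => (g c).foldl f acc) init = (l.flatMap g).foldl f init := by
  induction l generalizing init with
  | nil => rfl
  | cons a l ih => simp [List.foldl_append, ih]

-- count distributes over flatMap
theorem pvCountFlat (l : List (Int × Int)) (g : (Int × Int) → List Int) (j : Int) :
    ((l.flatMap g).count j) = (l.map (fun c => (g c).count j)).sum := by
  induction l with
  | nil => rfl
  | cons a l ih => simp [List.count_append, ih]

theorem pvNodupFst (plots : List (List (Int × Int))) :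
    ((PySem.List.enumerate plots).map (fun ip => ip.1)).Nodup :=
  List.Pairwise.imp (fun h => ne_of_lt h)
    ((List.pairwise_map).mpr (PySem.List.pairwise_lt_enumerate plots 0))

theorem pvRowPairwise (plots : List (List (Int × Int))) (i : Int) (p : List (Int × Int)) :
    (pvRow plots i p).Pairwise (· < ·) :=
  (List.pairwise_map).mpr
    (List.Pairwise.sublist List.filter_sublist (PySem.List.pairwise_lt_enumerate plots 0))

theorem pvRowMem (plots : List (List (Int × Int))) (i : Int) (p : List (Int × Int)) (j : Int) :
    j ∈ pvRow plots i p
      ↔ ∃ m : Nat, ∃ _ : m < plots.length, j = (m : Int) ∧ ¬ i = (m : Int) ∧ 2 ≤ pvCnt p plots[m] := by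
  unfold pvRow
  simp only [List.mem_map, List.mem_filter, PySem.List.mem_enumerate_iff]
  constructor
  · rintro ⟨jp, ⟨⟨m, hm, rfl⟩, hpred⟩, rfl⟩
    simp at hpred
    exact ⟨m, hm, by simpa using hpred⟩
  · rintro ⟨m, hm, rfl, h1, h2⟩
    exact ⟨((m : Int), plots[m]), ⟨⟨m, hm, by simp⟩, by simp [h1, h2]⟩, rfl⟩

-- the bucket of coordinate c: indices of the plots containing c
def pvBkt (plots : List (List (Int × Int))) (c : Int × Int) : List Int :=
  ((PySem.List.enumerate plots).filter
    (fun ip => decide (c ∈ PySem.Set.ofList ip.2))).map (fun ip => ip.1)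

theorem pvBktNodup (plots : List (List (Int × Int))) (c : Int × Int) :
    (pvBkt plots c).Nodup :=
  (pvNodupFst plots).sublist (List.Sublist.map _ List.filter_sublist)

theorem pvBktMem (plots : List (List (Int × Int))) (c : Int × Int) (j : Int) :
    j ∈ pvBkt plots c
      ↔ ∃ m : Nat, ∃ _ : m < plots.length, j = (m : Int) ∧ c ∈ PySem.Set.ofList plots[m] := by
  unfold pvBkt
  simp only [List.mem_map, List.mem_filter, PySem.List.mem_enumerate_iff]
  constructor
  · rintro ⟨jp, ⟨⟨m, hm, rfl⟩, hc⟩, rfl⟩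
    exact ⟨m, hm, by simp, by simpa using hc⟩
  · rintro ⟨m, hm, rfl, hc⟩
    exact ⟨((m : Int), plots[m]), ⟨⟨m, hm, by simp⟩, by simpa using hc⟩, rfl⟩

theorem pvBktCount (plots : List (List (Int × Int))) (c : Int × Int) (m : Nat)
    (hm : m < plots.length) :
    List.count ((m : Int)) (pvBkt plots c)
      = if c ∈ PySem.Set.ofList plots[m] then 1 else 0 := by
  by_cases hc : c ∈ PySem.Set.ofList plots[m]
  · rw [if_pos hc]
    exact List.count_eq_one_of_mem (pvBktNodup plots c)
      ((pvBktMem plots c _).mpr ⟨m, hm, rfl, hc⟩)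
  · rw [if_neg hc]
    refine List.count_eq_zero_of_not_mem (fun hmem => ?_)
    obtain ⟨m', hm', he, hc'⟩ := (pvBktMem plots c _).mp hmem
    have : m' = m := by exact_mod_cast he.symm
    exact hc (this ▸ hc')

theorem pvRowBEq (plots : List (List (Int × Int))) (k : Nat) (hk : k < plots.length)
    (counts : PySem.Dict Int Int)
    (hkeys : counts.keys
      = PySem.Set.ofList ((PySem.Set.ofList plots[k]).flatMap (fun c => pvBkt plots c)))
    (hgetD : ∀ j, counts.getD j 0
      = (List.count j ((PySem.Set.ofList plots[k]).flatMap (fun c => pvBkt plots c)) : Int)) :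
    PySem.List.sorted
      (counts.keys.filter (fun j => decide (2 ≤ counts.getD j 0) && decide (¬ j = (k : Int))))
      (fun j => j)
      = pvRow plots (k : Int) plots[k] := by
  have hLcount : ∀ (m : Nat) (hm : m < plots.length),
      List.count ((m : Int)) ((PySem.Set.ofList plots[k]).flatMap (fun c => pvBkt plots c))
        = pvCnt plots[k] plots[m] := by
    intro m hm
    rw [pvCountFlat]
    have : (PySem.Set.ofList plots[k]).map (fun c => List.count ((m:Int)) (pvBkt plots c))
        = (PySem.Set.ofList plots[k]).map
            (fun c => if decide (c ∈ PySem.Set.ofList plots[m]) then 1 else 0) := by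
      refine List.map_congr_left (fun c _ => ?_)
      rw [pvBktCount plots c m hm]
      by_cases hc : c ∈ PySem.Set.ofList plots[m] <;> simp [hc]
    rw [this, PySem.List.sum_map_ite_one_zero_nat]
    rfl
  refine PySem.List.sorted_eq_of_perm_of_pairwise_lt _ _ _ ?_ (pvRowPairwise plots _ _)
  rw [List.perm_ext_iff_of_nodup
    (List.Pairwise.imp (fun h => ne_of_lt h) (pvRowPairwise plots _ _))
    (List.Nodup.filter _ (hkeys ▸ PySem.Set.nodup_ofList _))]
  intro j
  rw [pvRowMem, List.mem_filter]
  constructor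
  · rintro ⟨m, hm, rfl, hne, hcnt⟩
    have hjL : (m : Int) ∈ (PySem.Set.ofList plots[k]).flatMap (fun c => pvBkt plots c) := by
      rw [← List.count_pos_iff, hLcount m hm]
      omega
    refine ⟨by rw [hkeys]; exact (PySem.Set.mem_ofList _ _).mpr hjL, ?_⟩
    rw [hgetD, hLcount m hm]
    simp only [Bool.and_eq_true, decide_eq_true_eq]
    constructor
    · exact_mod_cast hcnt
    · intro h; exact hne (by exact_mod_cast h.symm)
  · rintro ⟨hjk, hpred⟩
    simp only [Bool.and_eq_true, decide_eq_true_eq] at hpred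
    rw [hkeys, PySem.Set.mem_ofList] at hjk
    obtain ⟨c, _, hjb⟩ := List.mem_flatMap.mp hjk
    obtain ⟨m, hm, rfl, _⟩ := (pvBktMem plots c _).mp hjb
    refine ⟨m, hm, rfl, ?_, ?_⟩
    · intro h; exact hpred.2 (by exact_mod_cast h.symm)
    · have := hpred.1
      rw [hgetD, hLcount m hm] at this
      exact_mod_cast this

theorem pvB_eq (plots : List (List (Int × Int))) :
    find_overlapping_plots_alt plots
      = (PySem.List.enumerate plots).map (fun ip => (ip.1, pvRow plots ip.1 ip.2)) := by
  unfold find_overlapping_plots_alt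
  have hidx : ∀ c : Int × Int,
      (((PySem.List.enumerate plots).foldl (fun d ip =>
          (PySem.Set.ofList ip.2).foldl (fun d c' => d.modify c' [] (fun l => l ++ [ip.1])) d)
          PySem.Dict.empty).getD c []) = pvBkt plots c := by
    intro c
    rw [pvIndexChar plots 0 PySem.Dict.empty c]
    simp [pvBkt, PySem.Dict.getD_empty]
  simp only [hidx, PySem.List.foldl_append_singleton_eq_map, List.nil_append]
  refine List.map_congr_left (fun ip hip => ?_)
  obtain ⟨k, hk, rfl⟩ := (PySem.List.mem_enumerate_iff plots 0 ip).mp hip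
  simp only [zero_add]
  congr 1
  exact pvRowBEq plots k hk _
    (by
      rw [pvFoldlFlat, PySem.Dict.keys_foldl_modify _ _ (fun _ j => (fun x => x + 1))]
      simp [PySem.Dict.empty, PySem.Set.update_nil_left])
    (by
      intro j
      rw [pvFoldlFlat, PySem.Dict.getD_foldl_modify_add_one]
      simp [PySem.Dict.getD_empty])

-- ===== VERDICT (by name: the statement is the Claim_ definition above) =====
theorem find_overlapping_plots_spec : Claim_equal_find_overlapping_plots := by
  intro plots _
  unfold Spec_find_overlapping_plots
  rw [pvA_eq, pvB_eq]
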